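-- pv_equiv track=rewrite | github.com/Waynezee/ThemiX | BKR/script/client/time_series.py | analysis_data
-- ===== SOURCE A (Python) =====
-- def analysis_data(data, interval):
--     base_interval = interval
--     begin_time = None
--     next_begin_time = None
--     result = []
--     cnt = 0
--     for item in data:
--         timestamp = item[0]
--         if begin_time is None:
--             begin_time = timestamp
--             next_begin_time = timestamp + base_interval
--         while timestamp >= next_begin_time:
--             begin_time = next_begin_time
--             next_begin_time += base_interval
--             result.append(cnt)
--             cnt = 0
--         cnt += 1
--     result.append(cnt)
--
--     return result
-- ===== SOURCE B (Python) =====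
-- def analysis_data(data, interval):
--     counts = [0]
--     cur = 0
--     begin_time = None
--     for item in data:
--         timestamp = item[0]
--         if begin_time is None:
--             begin_time = timestamp
--         idx = (timestamp - begin_time) // interval
--         if idx > cur:
--             counts.extend([0] * (idx - cur))
--             cur = idx
--         counts[cur] += 1
--     return counts
-- ===== Notes on version B (the rewrite author's own statement) =====
-- stated objective: simpler
-- what changed: Replaces the stepped next_begin_time while-loop with a direct bucket index idx = (timestamp - begin_time) // interval, a running-max current bucket, and a counts list extended with zeros as needed.
import Mathlib
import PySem

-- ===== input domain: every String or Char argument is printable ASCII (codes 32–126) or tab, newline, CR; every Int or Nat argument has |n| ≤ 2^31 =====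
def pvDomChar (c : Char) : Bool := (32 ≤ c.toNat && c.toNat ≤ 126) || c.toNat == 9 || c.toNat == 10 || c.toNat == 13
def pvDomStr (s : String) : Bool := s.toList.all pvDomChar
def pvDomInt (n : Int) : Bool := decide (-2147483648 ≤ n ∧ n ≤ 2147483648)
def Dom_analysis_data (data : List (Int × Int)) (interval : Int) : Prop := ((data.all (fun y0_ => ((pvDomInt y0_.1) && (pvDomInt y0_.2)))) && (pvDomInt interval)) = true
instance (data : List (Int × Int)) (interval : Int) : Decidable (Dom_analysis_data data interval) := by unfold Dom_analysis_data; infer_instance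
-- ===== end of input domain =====

-- B replaces A's stepped next_begin_time while-loop by a direct bucket index
-- (timestamp - begin_time) // interval with a running-max current bucket (objective: simpler).


-- ===== PORT A =====
-- inner 'while timestamp >= next_begin_time' loop; the '0 < interval' conjunct is a
-- totality guard only (Python A loops forever when interval ≤ 0 and the condition holds;
-- such inputs are outside Pre_, so nothing is claimed there)
def pvWhileA (timestamp interval : Int) (nbt : Int) (result : List Int) (cnt : Int) :
    Int × List Int × Int :=
  if nbt ≤ timestamp ∧ 0 < interval then
    pvWhileA timestamp interval (nbt + interval) (result ++ [cnt]) 0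
  else (nbt, result, cnt)
termination_by (timestamp + 1 - nbt).toNat
decreasing_by omega

-- the 'for item in data' loop; state = (begin_time?, next_begin_time, result, cnt)
def pvLoopA (interval : Int) : List (Int × Int) → Option Int → Int → List Int → Int → List Int
  | [], _, _, result, cnt => result ++ [cnt]
  | item :: rest, bt, nbt, result, cnt =>
    let timestamp := item.1
    let bt' := match bt with | none => some timestamp | some b => some b
    let nbt' := match bt with | none => timestamp + interval | some _ => nbt
    let s := pvWhileA timestamp interval nbt' result cnt
    pvLoopA interval rest bt' s.1 s.2.1 (s.2.2 + 1)

def analysis_data (data : List (Int × Int)) (interval : Int) : List Int :=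
  pvLoopA interval data none 0 [] 0

-- ===== PORT B =====
-- the single for-loop of Source B; state = (begin_time?, cur, counts)
def pvLoopB (interval : Int) : List (Int × Int) → Option Int → Int → List Int → List Int
  | [], _, _, counts => counts
  | item :: rest, bt, cur, counts =>
    let timestamp := item.1
    let b := bt.getD timestamp
    let idx := PySem.Int.floordiv (timestamp - b) interval
    let cur' := if cur < idx then idx else cur
    let counts' := if cur < idx then counts ++ List.replicate (idx - cur).toNat 0 else counts
    pvLoopB interval rest (some b) cur' (counts'.modify cur'.toNat (· + 1))

def analysis_data_alt (data : List (Int × Int)) (interval : Int) : List Int :=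
  pvLoopB interval data none 0 [0]

-- ===== PRECONDITION & SPEC =====
-- Pre_ excludes interval ≤ 0 with nonempty data: there Python A's while-loop never
-- terminates (next_begin_time never passes the first timestamp), so A returns on no such input.
def Pre_analysis_data (data : List (Int × Int)) (interval : Int) : Prop :=
  data = [] ∨ 0 < interval
instance (data : List (Int × Int)) (interval : Int) : Decidable (Pre_analysis_data data interval) := by
  unfold Pre_analysis_data; infer_instance
def pvWitness_analysis_data : (List (Int × Int)) × Int := ([(3, 1), (5, 2), (12, 0)], 4)
def Spec_analysis_data (data : List (Int × Int)) (interval : Int) (out : List Int) : Prop := out = analysis_data_alt data interval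
instance (data : List (Int × Int)) (interval : Int) (out : List Int) : Decidable (Spec_analysis_data data interval out) := by unfold Spec_analysis_data; infer_instance

-- ===== CLAIM (what is proved, stated in full; the proofs are below) =====
def Claim_equal_analysis_data : Prop := ∀ (data : List (Int × Int)) (interval : Int), Dom_analysis_data data interval → Pre_analysis_data data interval → Spec_analysis_data data interval (analysis_data data interval)

-- ===== LEMMAS AND PROOFS =====

-- A's while loop does nothing when the timestamp is below next_begin_time
theorem pvWhileA_of_lt (t v nbt : Int) (r : List Int) (c : Int)
    (h : t < nbt) : pvWhileA t v nbt r c = (nbt, r, c) := by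
  rw [pvWhileA]; simp [not_and_of_not_left _ (by omega : ¬ nbt ≤ t)]

-- closed form of A's while loop: if it runs exactly m+1 iterations it appends cnt then m zeros
theorem pvWhileA_spec (v : Int) (hv : 0 < v) (t : Int) :
    ∀ (m : Nat) (nbt : Int), nbt + (m : Int) * v ≤ t → t < nbt + ((m : Int) + 1) * v →
    ∀ (r : List Int) (c : Int),
      pvWhileA t v nbt r c = (nbt + ((m : Int) + 1) * v, r ++ c :: List.replicate m 0, 0) := by
  intro m
  induction m with
  | zero =>
    intro nbt h1 h2 r c
    rw [pvWhileA, if_pos ⟨by omega, hv⟩, pvWhileA_of_lt _ _ _ _ _ (by omega)]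
    simp
  | succ k ih =>
    intro nbt h1 h2 r c
    rw [pvWhileA, if_pos ⟨by nlinarith, hv⟩,
        ih (nbt + v) (by push_cast at h1 ⊢; nlinarith) (by push_cast at h2 ⊢; nlinarith)]
    simp only [Prod.mk.injEq, List.append_assoc, List.cons_append, List.nil_append,
      List.replicate_succ]
    constructor
    · push_cast; ring
    · trivial

-- incrementing the last element of counts (length of the prefix = the index)
theorem modify_last (xs : List Int) (a : Int) (f : Int → Int) :
    (xs ++ [a]).modify xs.length f = xs ++ [f a] := by
  simp [List.modify_eq_set]

-- the main loop invariant: after the first item has fixed begin_time b, A's state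
-- (next_begin_time = b+(k+1)*v, result = r, cnt = c) corresponds to B's state
-- (cur = k, counts = r ++ [c]) where k = r.length is the current bucket index
theorem loop_invariant (v : Int) (hv : 0 < v) :
    ∀ (rest : List (Int × Int)) (b : Int) (k : Nat) (r : List Int) (c : Int),
      r.length = k →
      pvLoopA v rest (some b) (b + ((k : Int) + 1) * v) r c =
      pvLoopB v rest (some b) (k : Int) (r ++ [c]) := by
  intro rest
  induction rest with
  | nil => intro b k r c hk; simp [pvLoopA, pvLoopB]
  | cons item tail ih =>
    intro b k r c hk
    subst hk
    simp only [pvLoopA, pvLoopB, Option.getD_some]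
    set t := item.1 with ht
    set idx := PySem.Int.floordiv (t - b) v with hidx
    have hbr : idx * v ≤ t - b ∧ t - b < (idx + 1) * v :=
      (PySem.Int.floordiv_eq_iff_of_pos hv).mp hidx.symm
    by_cases hle : idx ≤ (r.length : Int)
    · -- timestamp stays in the current bucket
      have hlt : t < b + ((r.length : Int) + 1) * v := by nlinarith [hbr.1, hbr.2]
      rw [pvWhileA_of_lt t v _ r c hlt,
          if_neg (by omega : ¬ ((r.length : Int) < idx)),
          if_neg (by omega : ¬ ((r.length : Int) < idx))]
      simp only [Int.toNat_natCast]
      rw [modify_last]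
      exact ih b r.length r (c + 1) rfl
    · -- timestamp moves to bucket idx, skipping idx - k - 1 empty buckets
      rw [not_le] at hle
      set m : Nat := (idx - (r.length : Int) - 1).toNat with hmdef
      have hm : (m : Int) = idx - (r.length : Int) - 1 := by omega
      have e1 : b + ((r.length : Int) + 1) * v + (m : Int) * v = b + idx * v := by rw [hm]; ring
      have e2 : b + ((r.length : Int) + 1) * v + ((m : Int) + 1) * v = b + (idx + 1) * v := by
        rw [hm]; ring
      rw [pvWhileA_spec v hv t m _ (by linarith [hbr.1, e1]) (by linarith [hbr.2, e2]),
          if_pos hle, if_pos hle]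
      have hidxnat : ((idx.toNat : Nat) : Int) = idx := by omega
      have hrep : (idx - (r.length : Int)).toNat = m + 1 := by omega
      have hcounts : r ++ [c] ++ List.replicate (idx - (r.length : Int)).toNat 0
          = (r ++ c :: List.replicate m 0) ++ [0] := by
        rw [hrep, List.replicate_succ' ]
        simp
      have hlen : (r ++ c :: List.replicate m 0).length = idx.toNat := by
        simp; omega
      rw [hcounts, ← hlen, modify_last]
      have := ih b idx.toNat (r ++ c :: List.replicate m 0) 1 hlen
      rw [hidxnat] at this
      rw [e2, zero_add]
      exact this

-- the first item fixes begin_time and lands in bucket 0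
theorem analysis_data_spec : Claim_equal_analysis_data := by
  intro data interval _ hpre
  unfold Spec_analysis_data
  rcases data with _ | ⟨item, rest⟩
  · simp [analysis_data, analysis_data_alt, pvLoopA, pvLoopB]
  · have hv : 0 < interval := by
      rcases hpre with h | h
      · exact absurd h (by simp)
      · exact h
    unfold analysis_data analysis_data_alt
    simp only [pvLoopA, pvLoopB, Option.getD_none]
    rw [pvWhileA_of_lt _ _ _ _ _ (by omega : item.1 < item.1 + interval)]
    have hz : PySem.Int.floordiv (item.1 - item.1) interval = 0 := by
      simp [PySem.Int.floordiv]
    rw [hz, if_neg (by omega : ¬ (0:Int) < 0), if_neg (by omega : ¬ (0:Int) < 0)]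
    have h01 : ([(0:Int)] : List Int).modify (0:Int).toNat (· + 1) = [] ++ [(0:Int) + 1] := rfl
    rw [h01]
    have := loop_invariant interval hv rest item.1 0 [] (0 + 1) rfl
    simpa using this
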